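-- pv_equiv track=rewrite | github.com/ecmistry/uk-rag | server/apprenticeship_intensity_cron.py | compute_rolling_4q
-- ===== SOURCE A (Python) =====
-- from typing import Any, Dict, Tuple
--
-- def compute_rolling_4q(quarterly_starts: Dict[str, int]) -> Dict[str, int]:
--     """
--     Given dict of {'YYYY QN': starts}, compute rolling 4-quarter (12-month) sums.
--     Returns dict of {'YYYY QN': rolling_sum} for quarters with 4 preceding available.
--     """
--     sorted_q = sorted(quarterly_starts.items())
--     rolling = {}
--     for i in range(3, len(sorted_q)):
--         q_label = sorted_q[i][0]
--         total = sum(sorted_q[j][1] for j in range(i - 3, i + 1))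
--         rolling[q_label] = total
--     return rolling
-- ===== SOURCE B (Python) =====
-- def compute_rolling_4q(quarterly_starts):
--     sorted_q = sorted(quarterly_starts.items())
--     prefix = [0]
--     for _, v in sorted_q:
--         prefix.append(prefix[-1] + v)
--     rolling = {}
--     for i in range(3, len(sorted_q)):
--         rolling[sorted_q[i][0]] = prefix[i + 1] - prefix[i - 3]
--     return rolling
-- ===== Notes on version B (the rewrite author's own statement) =====
-- stated objective: alternative
-- what changed: B replaces A's per-quarter inner summation of the 4-element window with a prefix-sum list built once, each rolling value becoming a single subtraction prefix[i+1]-prefix[i-3].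
import Mathlib
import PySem

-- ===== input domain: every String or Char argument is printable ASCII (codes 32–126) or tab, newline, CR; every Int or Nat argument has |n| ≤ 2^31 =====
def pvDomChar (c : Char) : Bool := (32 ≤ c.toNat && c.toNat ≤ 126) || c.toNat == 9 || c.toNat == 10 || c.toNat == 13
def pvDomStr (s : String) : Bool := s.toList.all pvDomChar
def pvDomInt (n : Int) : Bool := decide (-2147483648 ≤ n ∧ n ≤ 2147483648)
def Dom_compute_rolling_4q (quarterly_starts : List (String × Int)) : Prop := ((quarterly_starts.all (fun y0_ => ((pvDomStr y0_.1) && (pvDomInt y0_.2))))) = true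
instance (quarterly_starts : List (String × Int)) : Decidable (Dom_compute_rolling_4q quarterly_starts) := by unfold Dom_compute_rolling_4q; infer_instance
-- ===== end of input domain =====

-- B computes each rolling 4-quarter value as a difference of two prefix sums instead of re-summing the window.

-- ===== PORT A =====
def compute_rolling_4q (quarterly_starts : List (String × Int)) : List (String × Int) :=
  let sorted_q := PySem.List.sorted2 quarterly_starts Prod.fst Prod.snd
  let rolling : PySem.Dict String Int :=
    (PySem.List.pyRange 3 (sorted_q.length : Int) 1).foldl
      (fun rolling i =>
        let q_label := (PySem.List.pyGetD sorted_q i ("", 0)).1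
        let total := ((PySem.List.pyRange (i - 3) (i + 1) 1).map
          (fun j => (PySem.List.pyGetD sorted_q j ("", 0)).2)).sum
        rolling.insert q_label total)
      PySem.Dict.empty
  rolling.items

-- ===== PORT B =====
def compute_rolling_4q_alt (quarterly_starts : List (String × Int)) : List (String × Int) :=
  let sorted_q := PySem.List.sorted2 quarterly_starts Prod.fst Prod.snd
  let pfx := sorted_q.foldl (fun p x => p ++ [PySem.List.pyGetD p (-1) 0 + x.2]) [0]
  let rolling : PySem.Dict String Int :=
    (PySem.List.pyRange 3 (sorted_q.length : Int) 1).foldl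
      (fun rolling i =>
        rolling.insert (PySem.List.pyGetD sorted_q i ("", 0)).1
          (PySem.List.pyGetD pfx (i + 1) 0 - PySem.List.pyGetD pfx (i - 3) 0))
      PySem.Dict.empty
  rolling.items

-- ===== PRECONDITION & SPEC =====
def Spec_compute_rolling_4q (quarterly_starts : List (String × Int)) (out : List (String × Int)) : Prop := out = compute_rolling_4q_alt quarterly_starts
instance (quarterly_starts : List (String × Int)) (out : List (String × Int)) : Decidable (Spec_compute_rolling_4q quarterly_starts out) := by unfold Spec_compute_rolling_4q; infer_instance

-- ===== CLAIM (what is proved, stated in full; the proofs are below) =====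
def Claim_equal_compute_rolling_4q : Prop := ∀ (quarterly_starts : List (String × Int)), Dom_compute_rolling_4q quarterly_starts → Spec_compute_rolling_4q quarterly_starts (compute_rolling_4q quarterly_starts)

-- ===== LEMMAS AND PROOFS =====

-- sum of the values of the first k entries
def pvS (l : List (String × Int)) (k : Nat) : Int := ((l.take k).map Prod.snd).sum

-- the suffix of the prefix-sum list produced by B's first loop, starting after running total s
def pvScan (s : Int) : List (String × Int) → List Int
  | [] => []
  | x :: t => (s + x.2) :: pvScan (s + x.2) t

lemma pvScan_length (s : Int) (l : List (String × Int)) : (pvScan s l).length = l.length := by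
  induction l generalizing s with
  | nil => rfl
  | cons x t ih => simp [pvScan, ih]

lemma pvScan_get (s : Int) (l : List (String × Int)) (k : Nat) (hk : k < l.length) :
    (pvScan s l)[k]'(by rw [pvScan_length]; exact hk) = s + pvS l (k + 1) := by
  induction l generalizing s k with
  | nil => simp at hk
  | cons x t ih =>
    cases k with
    | zero => simp [pvScan, pvS]
    | succ m =>
      have hm : m < t.length := by simpa using hk
      simp only [pvScan, List.getElem_cons_succ]
      rw [ih (s + x.2) m hm]
      simp [pvS, List.take_succ_cons]
      ring

lemma pvBuild (l : List (String × Int)) (acc : List Int) (h : acc ≠ []) :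
    l.foldl (fun p x => p ++ [PySem.List.pyGetD p (-1) 0 + x.2]) acc
      = acc ++ pvScan (acc.getLast h) l := by
  induction l generalizing acc with
  | nil => simp [pvScan]
  | cons x t ih =>
    simp only [List.foldl_cons]
    rw [PySem.List.pyGetD_neg_one acc 0 h]
    rw [ih (acc ++ [acc.getLast h + x.2]) (by simp)]
    simp [pvScan]

lemma pvPrefix_get (l : List (String × Int)) (k : Nat) (hk : k ≤ l.length) :
    PySem.List.pyGetD (l.foldl (fun p x => p ++ [PySem.List.pyGetD p (-1) 0 + x.2]) [0]) (k : Int) 0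
      = pvS l k := by
  rw [pvBuild l [0] (by simp)]
  simp only [List.getLast_singleton, List.singleton_append]
  cases k with
  | zero =>
    rw [PySem.List.pyGetD_eq_getElem _ _ (by simp) (by simp)]
    simp [pvS]
  | succ m =>
    have hm : m < l.length := by omega
    rw [PySem.List.pyGetD_eq_getElem _ _ (by omega) (by simp [pvScan_length]; omega)]
    simp only [Int.toNat_natCast, List.getElem_cons_succ]
    rw [pvScan_get 0 l m hm]
    ring

lemma pvS_succ (l : List (String × Int)) (k : Nat) (hk : k < l.length) :
    pvS l (k + 1) = pvS l k + (l[k]).2 := by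
  unfold pvS
  simp only [List.map_take]
  rw [List.take_succ_eq_append_getElem (by simpa using hk)]
  simp

lemma pvWindow (l : List (String × Int)) (i : Int) (h3 : 3 ≤ i) (hn : i < (l.length : Int)) :
    ((PySem.List.pyRange (i - 3) (i + 1) 1).map
        (fun j => (PySem.List.pyGetD l j ("", 0)).2)).sum
      = PySem.List.pyGetD (l.foldl (fun p x => p ++ [PySem.List.pyGetD p (-1) 0 + x.2]) [0]) (i + 1) 0
        - PySem.List.pyGetD (l.foldl (fun p x => p ++ [PySem.List.pyGetD p (-1) 0 + x.2]) [0]) (i - 3) 0 := by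
  set k : Nat := (i - 3).toNat with hk
  have hik : i - 3 = (k : Int) := by omega
  have hik4 : i + 1 = ((k + 4 : Nat) : Int) := by omega
  have hkl : k + 4 ≤ l.length := by omega
  have hrange : PySem.List.pyRange (i - 3) (i + 1) = [i - 3, i - 2, i - 1, i] := by
    rw [PySem.List.pyRange_one_cons (by omega), PySem.List.pyRange_one_cons (by omega),
        PySem.List.pyRange_one_cons (by omega), PySem.List.pyRange_one_cons (by omega),
        PySem.List.pyRange_one_eq_nil (by omega)]
    norm_num
    omega
  have g0 : PySem.List.pyGetD l (i - 3) ("", 0) = l[k]'(by omega) := by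
    rw [PySem.List.pyGetD_eq_getElem _ _ (by omega) (by omega)]
  have g1 : PySem.List.pyGetD l (i - 2) ("", 0) = l[k + 1]'(by omega) := by
    rw [PySem.List.pyGetD_eq_getElem _ _ (by omega) (by omega)]; congr 1; omega
  have g2 : PySem.List.pyGetD l (i - 1) ("", 0) = l[k + 2]'(by omega) := by
    rw [PySem.List.pyGetD_eq_getElem _ _ (by omega) (by omega)]; congr 1; omega
  have g3 : PySem.List.pyGetD l i ("", 0) = l[k + 3]'(by omega) := by
    rw [PySem.List.pyGetD_eq_getElem _ _ (by omega) (by omega)]; congr 1; omega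
  rw [hrange]
  simp only [List.map_cons, List.map_nil, List.sum_cons, List.sum_nil]
  rw [g0, g1, g2, g3]
  rw [hik, hik4, pvPrefix_get l (k + 4) hkl, pvPrefix_get l k (by omega)]
  rw [show k + 4 = ((k + 3) + 1) from rfl, pvS_succ l (k + 3) (by omega),
      pvS_succ l (k + 2) (by omega), pvS_succ l (k + 1) (by omega), pvS_succ l k (by omega)]
  ring

-- ===== VERDICT (by name: the statement is the Claim_ definition above) =====
theorem compute_rolling_4q_spec : Claim_equal_compute_rolling_4q := by
  intro qs _
  simp only [Spec_compute_rolling_4q, compute_rolling_4q, compute_rolling_4q_alt]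
  set l := PySem.List.sorted2 qs Prod.fst Prod.snd with hl
  congr 1
  apply PySem.List.foldl_congr_mem
  intro acc i hi
  rw [PySem.List.mem_pyRange_one] at hi
  rw [pvWindow l i hi.1 hi.2]
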